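-- pv_equiv track=rewrite | github.com/shivamJerry2108064/PYTHON_IMP_Q | MOCK/OPPE2_MOCK3/MOCK3_Q2.py | n_happy_numbers
-- ===== SOURCE A (Python) =====
-- def n_happy_numbers(l:list):
--
--     def sum_square_digit(n):
--         return sum(int(str(n)[i])**2 for i in range(len(str(n))))
--
--     def check_happy_num(val):
--         set_num = set()
--         while(val != 1 and val not in set_num):     # if val == 1 then val is happy
--             set_num.add(val)
--             val = sum_square_digit(val)      # if val is not 1 and present in set then it means that now sequence repeats
--         return val == 1
--
--     count = 0
--     happy_list = []
--     for el in l: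
--         res = check_happy_num(el)
--         if res:
--             count += 1
--             happy_list.append(el)
--
--     return count , happy_list
-- ===== SOURCE B (Python) =====
-- def n_happy_numbers(l: list):
--
--     def digit_square_sum(n):
--         s = 0
--         while n > 0:
--             d = n % 10
--             s += d * d
--             n //= 10
--         return s
--
--     def is_happy(v):
--         # iterate the digit-square-sum map until it reaches a known terminal value:
--         # 1 (happy), 4 (on the unique unhappy cycle), 0 (fixed point of 0)
--         while v not in (0, 1, 4):
--             v = digit_square_sum(v)
--         return v == 1
--
--     happy_list = [el for el in l if is_happy(el)]
--     return len(happy_list), happy_list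
-- ===== Notes on version B (the rewrite author's own statement) =====
-- stated objective: faster
-- what changed: The digit square sum is computed arithmetically with % 10 and // 10 instead of building str(n) and parsing each character back with int(); cycle detection no longer keeps a growing seen-set with per-step membership tests but iterates until one of the known terminal values 0, 1, 4 is reached (1 = happy, 4 = the unique unhappy cycle, 0 = fixed point); the outer counting loop becomes a filter comprehension plus len.
import Mathlib
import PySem

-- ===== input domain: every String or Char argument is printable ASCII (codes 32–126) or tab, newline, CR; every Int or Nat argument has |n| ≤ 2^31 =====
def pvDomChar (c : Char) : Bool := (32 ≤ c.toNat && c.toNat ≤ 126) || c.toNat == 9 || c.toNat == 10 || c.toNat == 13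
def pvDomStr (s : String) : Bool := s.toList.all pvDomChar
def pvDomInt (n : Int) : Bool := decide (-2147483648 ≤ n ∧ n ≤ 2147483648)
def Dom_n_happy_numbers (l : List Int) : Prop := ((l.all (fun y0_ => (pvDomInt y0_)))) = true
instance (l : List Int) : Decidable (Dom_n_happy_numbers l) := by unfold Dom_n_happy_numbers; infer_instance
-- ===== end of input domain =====

-- B computes the digit square sum arithmetically (% 10, // 10) instead of through str(),
-- detects the cycle by iterating to the known terminal values {0, 1, 4} of the map instead of
-- keeping a growing seen-set, and counts with filter + len (objective: faster, measured).

-- ===== PORT A =====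
-- sum(int(str(n)[i])**2 for i in range(len(str(n))))
def pvSumSquareDigitA (n : Int) : Int :=
  (List.range (PySem.Int.toChars n).length).foldl
    (fun acc i => acc + ((PySem.Int.ofChars? [(PySem.Int.toChars n).getD i ' ']).getD 0) ^ 2) 0

-- the while loop of check_happy_num; fuel is only a termination guard (proved sufficient
-- below for the fuel the wrapper passes, on every input Pre_ admits)
def pvCheckLoopA : Nat → PySem.Set Int → Int → Option Bool
  | 0, _, _ => none
  | f+1, setNum, val =>
    if val == 1 || PySem.Set.contains setNum val then some (val == 1)
    else pvCheckLoopA f (PySem.Set.add setNum val) (pvSumSquareDigitA val)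

def pvCheckHappyA (val : Int) : Bool :=
  (pvCheckLoopA (164 + val.toNat) PySem.Set.empty val).getD false

def n_happy_numbers (l : List Int) : Int × List Int :=
  l.foldl (fun st el => if pvCheckHappyA el then (st.1 + 1, st.2 ++ [el]) else st)
    ((0 : Int), ([] : List Int))

-- ===== PORT B =====
-- while n > 0: d = n % 10; s += d*d; n //= 10  (fuel n.toNat + 1 always suffices: n // 10 shrinks)
def pvStepLoopB : Nat → Int → Int → Int
  | 0, _, s => s
  | f+1, n, s =>
    if 0 < n then
      pvStepLoopB f (PySem.Int.floordiv n 10) (s + PySem.Int.mod n 10 * PySem.Int.mod n 10)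
    else s

def pvDigitSquareSumB (n : Int) : Int := pvStepLoopB (n.toNat + 1) n 0

-- while v not in (0, 1, 4): v = digit_square_sum(v); returns the terminal v
def pvCheckLoopB : Nat → Int → Option Int
  | 0, _ => none
  | f+1, v =>
    if v == 0 || v == 1 || v == 4 then some v
    else pvCheckLoopB f (pvDigitSquareSumB v)

def pvIsHappyB (val : Int) : Bool := (pvCheckLoopB (164 + val.toNat) val).getD 0 == 1

def n_happy_numbers_alt (l : List Int) : Int × List Int :=
  let happyList := l.filter (fun el => pvIsHappyB el)
  ((happyList.length : Int), happyList)

-- ===== PRECONDITION & SPEC =====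
-- Pre_ excludes lists with a negative element: there A raises ValueError (int('-') on the sign
-- character of str(val)).
def Pre_n_happy_numbers (l : List Int) : Prop := ∀ el ∈ l, 0 ≤ el
instance (l : List Int) : Decidable (Pre_n_happy_numbers l) := by unfold Pre_n_happy_numbers; infer_instance

def pvWitness_n_happy_numbers : List Int := [7, 1, 0, 4]

def Spec_n_happy_numbers (l : List Int) (out : Int × List Int) : Prop := out = n_happy_numbers_alt l
instance (l : List Int) (out : Int × List Int) : Decidable (Spec_n_happy_numbers l out) := by unfold Spec_n_happy_numbers; infer_instance

-- ===== CLAIM (what is proved, stated in full; the proofs are below) =====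
def Claim_equal_n_happy_numbers : Prop := ∀ (l : List Int), Dom_n_happy_numbers l → Pre_n_happy_numbers l → Spec_n_happy_numbers l (n_happy_numbers l)

-- ===== LEMMAS AND PROOFS =====

-- Nat-level mirrors (defined with Nat.rec so that `decide` evaluates them cheaply)
def pvDigs (f : Nat) : Nat → List Nat :=
  Nat.rec (fun _ => []) (fun _ ih m => m % 10 :: (if m / 10 = 0 then [] else ih (m / 10))) f

def pvStepN (m : Nat) : Nat := ((pvDigs (m + 1) m).map (fun d => d * d)).sum

def pvALoopN (f : Nat) : List Nat → Nat → Option Bool :=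
  Nat.rec (fun _ _ => none)
    (fun _ ih s v => if v == 1 || s.contains v then some (v == 1)
                     else ih (s ++ [v]) (pvStepN v)) f

def pvBLoopN (f : Nat) : Nat → Option Nat :=
  Nat.rec (fun _ => none)
    (fun _ ih v => if v == 0 || v == 1 || v == 4 then some v
                   else ih (pvStepN v)) f

theorem pvALoopN_zero (s : List Nat) (v : Nat) : pvALoopN 0 s v = none := rfl
theorem pvALoopN_succ (f : Nat) (s : List Nat) (v : Nat) :
    pvALoopN (f+1) s v = (if v == 1 || s.contains v then some (v == 1)
                          else pvALoopN f (s ++ [v]) (pvStepN v)) := rfl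
theorem pvBLoopN_zero (v : Nat) : pvBLoopN 0 v = none := rfl
theorem pvBLoopN_succ (f : Nat) (v : Nat) :
    pvBLoopN (f+1) v = (if v == 0 || v == 1 || v == 4 then some v
                        else pvBLoopN f (pvStepN v)) := rfl

-- the finite computation: both loops agree (and terminate) on all start values ≤ 163,
-- and one digit-square-sum step from any value ≤ 243 lands ≤ 163
set_option maxRecDepth 20000 in
theorem pvTable : ((List.range 164).all (fun m =>
    match pvALoopN 164 [] m, pvBLoopN 164 m with
    | some a, some t => a == (t == 1)
    | _, _ => false)
  && (List.range 244).all (fun m => pvStepN m ≤ 163)) = true := by decide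

theorem pvDigs_zero (m : Nat) : pvDigs 0 m = [] := rfl
theorem pvDigs_succ (f m : Nat) :
    pvDigs (f+1) m = m % 10 :: (if m / 10 = 0 then [] else pvDigs f (m / 10)) := rfl

-- digits are < 10
theorem pvDigs_lt (f : Nat) : ∀ m, ∀ d ∈ pvDigs f m, d < 10 := by
  induction f with
  | zero => intro m d hd; simp [pvDigs_zero] at hd
  | succ f ih =>
    intro m d hd
    rw [pvDigs_succ] at hd
    rcases List.mem_cons.1 hd with h | h
    · omega
    · by_cases h10 : m / 10 = 0
      · simp [h10] at h
      · rw [if_neg h10] at h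
        exact ih (m / 10) d h

-- length bound
theorem pvDigs_len (f : Nat) : ∀ m e, m < 10 ^ e → 1 ≤ e → (pvDigs f m).length ≤ e := by
  induction f with
  | zero => intro m e _ he; simp [pvDigs_zero]
  | succ f ih =>
    intro m e hm he
    rw [pvDigs_succ]
    by_cases h10 : m / 10 = 0
    · simp [h10]; omega
    · rw [if_neg h10]
      obtain ⟨e', rfl⟩ : ∃ e', e = e' + 1 := ⟨e - 1, by omega⟩
      have hdiv : m / 10 < 10 ^ e' := by
        rw [Nat.div_lt_iff_lt_mul (by norm_num)]
        calc m < 10 ^ (e' + 1) := hm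
        _ = 10 ^ e' * 10 := by ring
      have he' : 1 ≤ e' := by
        by_contra hc
        have : e' = 0 := by omega
        subst this
        simp at hdiv
        omega
      simpa using Nat.add_le_add_right (ih (m / 10) e' hdiv he') 1

-- fuel irrelevance for pvDigs
theorem pvDigs_fuel (f : Nat) : ∀ g m, m < f → m < g → pvDigs f m = pvDigs g m := by
  induction f with
  | zero => intro g m hf _; omega
  | succ f ih =>
    intro g m hf hg
    obtain ⟨g', rfl⟩ : ∃ k, g = k + 1 := ⟨g - 1, by omega⟩
    rw [pvDigs_succ, pvDigs_succ]
    by_cases h10 : m / 10 = 0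
    · rw [if_pos h10, if_pos h10]
    · rw [if_neg h10, if_neg h10]
      have hm10 : m ≥ 10 := by
        by_contra hc
        exact h10 (Nat.div_eq_of_lt (by omega))
      have hlt : m / 10 < m := Nat.div_lt_self (by omega) (by norm_num)
      rw [ih g' (m / 10) (by omega) (by omega)]

-- analytic step bound
theorem pvStepN_le (m e : Nat) (hm : m < 10 ^ e) (he : 1 ≤ e) : pvStepN m ≤ 81 * e := by
  unfold pvStepN
  have hlen : ((pvDigs (m + 1) m).map (fun d => d * d)).length ≤ e := by
    rw [List.length_map]
    exact pvDigs_len (m + 1) m e hm he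
  have hbd : ∀ x ∈ (pvDigs (m + 1) m).map (fun d => d * d), x ≤ 81 := by
    intro x hx
    obtain ⟨d, hd, rfl⟩ := List.mem_map.1 hx
    have := pvDigs_lt (m + 1) m d hd
    nlinarith
  calc ((pvDigs (m + 1) m).map (fun d => d * d)).sum
      ≤ ((pvDigs (m + 1) m).map (fun d => d * d)).length • 81 :=
        List.sum_le_card_nsmul _ _ hbd
    _ = ((pvDigs (m + 1) m).map (fun d => d * d)).length * 81 := by simp [smul_eq_mul]
    _ ≤ e * 81 := Nat.mul_le_mul_right _ hlen
    _ = 81 * e := by ring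

theorem pvStepN_le_163 (m : Nat) (hm : m ≤ 243) : pvStepN m ≤ 163 := by
  have htbl := pvTable
  rw [Bool.and_eq_true] at htbl
  have h2 := htbl.2
  rw [List.all_eq_true] at h2
  have := h2 m (List.mem_range.2 (by omega))
  exact of_decide_eq_true this

-- the unfolding of pvStepN along m % 10 / m / 10
theorem pvStepN_zero : pvStepN 0 = 0 := rfl

theorem pvStepN_rec (m : Nat) (hm : 0 < m) :
    pvStepN m = m % 10 * (m % 10) + pvStepN (m / 10) := by
  by_cases h10 : m / 10 = 0
  · show ((pvDigs (m+1) m).map _).sum = _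
    rw [pvDigs_succ, if_pos h10, h10, pvStepN_zero]
    simp
  · show ((pvDigs (m+1) m).map _).sum = _
    rw [pvDigs_succ, if_neg h10]
    have hm10 : m ≥ 10 := by
      by_contra hc
      exact h10 (Nat.div_eq_of_lt (by omega))
    have hlt : m / 10 < m := Nat.div_lt_self (by omega) (by norm_num)
    rw [pvDigs_fuel m (m / 10 + 1) (m / 10) (by omega) (by omega)]
    show m % 10 * (m % 10) + ((pvDigs (m/10+1) (m/10)).map (fun d => d * d)).sum = _
    rfl

-- ===== A-side bridges (string digit sum ↔ pvStepN) =====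
theorem pvToDigitsCore_eq (f : Nat) : ∀ (n : Nat) (l : List Char),
    Nat.toDigitsCore 10 (f+1) n l = ((pvDigs (f+1) n).map Nat.digitChar).reverse ++ l := by
  induction f with
  | zero =>
    intro n l
    rw [pvDigs_succ, pvDigs_zero]
    rw [Nat.toDigitsCore]
    split <;> simp [Nat.toDigitsCore]
  | succ f ih =>
    intro n l
    rw [pvDigs_succ]
    rw [Nat.toDigitsCore]
    by_cases h10 : n / 10 = 0
    · rw [if_pos h10, if_pos h10]; simp
    · rw [if_neg h10, if_neg h10]
      rw [ih (n / 10) (Nat.digitChar (n % 10) :: l)]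
      simp

theorem pvToChars_eq (m : Nat) :
    PySem.Int.toChars (m : Int) = ((pvDigs (m+1) m).map Nat.digitChar).reverse := by
  have h0 : ¬ ((m : Int) < 0) := not_lt.mpr (Int.natCast_nonneg m)
  simp only [PySem.Int.toChars, if_neg h0, Int.toNat_natCast]
  rw [Nat.toDigits, pvToDigitsCore_eq m m []]
  simp

theorem pvDigitChar_val (d : Nat) (hd : d < 10) :
    PySem.Int.ofChars? [Nat.digitChar d] = some (d : Int) := by
  interval_cases d <;> decide

-- sum of squared digit chars, as a Nat
theorem pvMapSum (m : Nat) :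
    ((((pvDigs (m+1) m).map Nat.digitChar).reverse).map
      (fun c => ((PySem.Int.ofChars? [c]).getD 0) ^ 2)).sum = (pvStepN m : Int) := by
  rw [List.map_reverse, List.sum_reverse, List.map_map]
  unfold pvStepN
  rw [Nat.cast_list_sum, List.map_map]
  apply congrArg List.sum
  apply List.map_congr_left
  intro d hd
  have hlt := pvDigs_lt (m+1) m d hd
  simp only [Function.comp_apply, pvDigitChar_val d hlt, Option.getD_some]
  push_cast
  ring

theorem pvFoldlRange (l : List Char) (g : Char → Int) :
    (List.range l.length).foldl (fun acc i => acc + g (l.getD i ' ')) 0 = (l.map g).sum := by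
  rw [PySem.List.foldl_add]
  have : (List.range l.length).map (fun i => g (l.getD i ' ')) = l.map g := by
    apply List.ext_getElem
    · simp
    · intro i h1 h2
      simp [List.getD_eq_getElem?_getD, List.getElem?_eq_getElem (by simpa using h2)]
  rw [this]; ring

theorem pvStepA_cast (m : Nat) : pvSumSquareDigitA (m : Int) = (pvStepN m : Int) := by
  unfold pvSumSquareDigitA
  rw [pvFoldlRange (PySem.Int.toChars (m : Int)) (fun c => ((PySem.Int.ofChars? [c]).getD 0) ^ 2)]
  rw [pvToChars_eq, pvMapSum]

-- ===== B-side bridges (arithmetic digit sum ↔ pvStepN) =====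
theorem pvFloordivCast (m : Nat) : PySem.Int.floordiv (m : Int) 10 = ((m / 10 : Nat) : Int) := by
  exact_mod_cast PySem.Int.floordiv_natCast m 10

theorem pvModCast (m : Nat) : PySem.Int.mod (m : Int) 10 = ((m % 10 : Nat) : Int) := by
  exact_mod_cast PySem.Int.mod_natCast m 10

theorem pvStepLoopB_cast (m : Nat) : ∀ f, m < f → ∀ s : Int,
    pvStepLoopB f (m : Int) s = s + (pvStepN m : Int) := by
  induction m using Nat.strong_induction_on with
  | _ m ih =>
  intro f hf s
  obtain ⟨f', rfl⟩ : ∃ k, f = k + 1 := ⟨f - 1, by omega⟩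
  show (if 0 < (m : Int) then
          pvStepLoopB f' (PySem.Int.floordiv (m : Int) 10)
            (s + PySem.Int.mod (m : Int) 10 * PySem.Int.mod (m : Int) 10)
        else s) = s + (pvStepN m : Int)
  by_cases hm : 0 < m
  · rw [if_pos (by exact_mod_cast hm), pvFloordivCast, pvModCast]
    have hlt : m / 10 < m := Nat.div_lt_self hm (by norm_num)
    rw [ih (m / 10) hlt f' (by omega)]
    rw [pvStepN_rec m hm]
    push_cast
    ring
  · have hm0 : m = 0 := by omega
    subst hm0
    rw [if_neg (by simp)]
    simp [pvStepN_zero]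

theorem pvStepB_cast (m : Nat) : pvDigitSquareSumB (m : Int) = (pvStepN m : Int) := by
  unfold pvDigitSquareSumB
  rw [Int.toNat_natCast]
  rw [pvStepLoopB_cast m (m + 1) (by omega) 0]
  ring

-- Bool-equality cast helpers
theorem pvBeqCast (a b : Nat) : ((a : Int) == (b : Int)) = (a == b) := by
  by_cases h : a = b
  · subst h; simp
  · have h' : (a : Int) ≠ (b : Int) := by exact_mod_cast h
    simp [h, h']

theorem pvContainsCast (s : List Nat) (v : Nat) :
    (s.map (fun x : Nat => (x : Int))).contains (v : Int) = s.contains v := by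
  induction s with
  | nil => rfl
  | cons a s ih => simp

-- loop bridges
theorem pvALoop_cast (f : Nat) : ∀ (s : List Nat) (v : Nat),
    pvCheckLoopA f (s.map (fun x : Nat => (x : Int))) (v : Int) = pvALoopN f s v := by
  induction f with
  | zero => intro s v; rfl
  | succ f ih =>
    intro s v
    rw [pvALoopN_succ]
    show (if ((v : Int) == 1 || PySem.Set.contains (s.map (fun x : Nat => (x : Int))) (v : Int))
          then some ((v : Int) == 1)
          else pvCheckLoopA f (PySem.Set.add (s.map (fun x : Nat => (x : Int))) (v : Int))
            (pvSumSquareDigitA (v : Int))) = _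
    have hc : PySem.Set.contains (s.map (fun x : Nat => (x : Int))) (v : Int) = s.contains v := by
      rw [PySem.Set.contains_eq_listContains, pvContainsCast]
    have h1 : ((v : Int) == (1 : Int)) = (v == 1) := by
      simp
    rw [hc, h1]
    by_cases hcond : (v == 1 || s.contains v) = true
    · rw [if_pos hcond, if_pos hcond]
    · rw [if_neg hcond, if_neg hcond]
      have hnotmem : (v : Int) ∉ s.map (fun x : Nat => (x : Int)) := by
        intro hmem
        apply hcond
        have hvmem : v ∈ s := by
          rcases List.mem_map.1 hmem with ⟨x, hx, hxe⟩
          have hxv : x = v := Nat.cast_injective hxe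
          exact hxv ▸ hx
        simp only [Bool.or_eq_true, beq_iff_eq]
        right
        simpa using hvmem
      rw [PySem.Set.add_of_not_mem hnotmem]
      have : (s.map (fun x : Nat => (x : Int))) ++ [(v : Int)] = (s ++ [v]).map (fun x : Nat => (x : Int)) := by
        simp
      rw [this, pvStepA_cast]
      exact ih (s ++ [v]) (pvStepN v)

theorem pvBLoop_cast (f : Nat) : ∀ (v : Nat),
    pvCheckLoopB f (v : Int) = (pvBLoopN f v).map (fun t : Nat => (t : Int)) := by
  induction f with
  | zero => intro v; rfl
  | succ f ih =>
    intro v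
    rw [pvBLoopN_succ]
    show (if ((v : Int) == 0 || (v : Int) == 1 || (v : Int) == 4)
          then some (v : Int)
          else pvCheckLoopB f (pvDigitSquareSumB (v : Int))) = _
    have h0 : ((v : Int) == (0 : Int)) = (v == 0) := by simp
    have h1 : ((v : Int) == (1 : Int)) = (v == 1) := by simp
    have h4 : ((v : Int) == (4 : Int)) = (v == 4) := by exact_mod_cast pvBeqCast v 4
    rw [h0, h1, h4]
    by_cases hcond : (v == 0 || v == 1 || v == 4) = true
    · rw [if_pos hcond, if_pos hcond]; rfl
    · rw [if_neg hcond, if_neg hcond]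
      rw [pvStepB_cast]
      exact ih (pvStepN v)

-- fuel monotonicity
theorem pvALoopN_mono (f : Nat) : ∀ (f' : Nat), f ≤ f' → ∀ s v r,
    pvALoopN f s v = some r → pvALoopN f' s v = some r := by
  induction f with
  | zero => intro f' _ s v r h; rw [pvALoopN_zero] at h; exact absurd h (by simp)
  | succ f ih =>
    intro f' hf s v r h
    obtain ⟨f'', rfl⟩ : ∃ k, f' = k + 1 := ⟨f' - 1, by omega⟩
    rw [pvALoopN_succ] at h ⊢
    by_cases hcond : (v == 1 || s.contains v) = true
    · rw [if_pos hcond] at h ⊢; exact h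
    · rw [if_neg hcond] at h ⊢
      exact ih f'' (by omega) _ _ _ h

theorem pvBLoopN_mono (f : Nat) : ∀ (f' : Nat), f ≤ f' → ∀ v r,
    pvBLoopN f v = some r → pvBLoopN f' v = some r := by
  induction f with
  | zero => intro f' _ v r h; rw [pvBLoopN_zero] at h; exact absurd h (by simp)
  | succ f ih =>
    intro f' hf v r h
    obtain ⟨f'', rfl⟩ : ∃ k, f' = k + 1 := ⟨f' - 1, by omega⟩
    rw [pvBLoopN_succ] at h ⊢
    by_cases hcond : (v == 0 || v == 1 || v == 4) = true
    · rw [if_pos hcond] at h ⊢; exact h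
    · rw [if_neg hcond] at h ⊢
      exact ih f'' (by omega) _ _ h

-- the seen-set entries are irrelevant while the orbit stays inside a region where membership agrees
theorem pvALoopN_set_congr (P : Nat → Prop) (hstep : ∀ w, P w → P (pvStepN w))
    (f : Nat) : ∀ (s t : List Nat), (∀ x, P x → t.contains x = s.contains x) →
    ∀ w, P w → pvALoopN f t w = pvALoopN f s w := by
  induction f with
  | zero => intro s t _ w _; rfl
  | succ f ih =>
    intro s t hst w hw
    rw [pvALoopN_succ, pvALoopN_succ, hst w hw]
    by_cases hcond : (w == 1 || s.contains w) = true
    · rw [if_pos hcond, if_pos hcond]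
    · rw [if_neg hcond, if_neg hcond]
      apply ih (s ++ [w]) (t ++ [w]) _ (pvStepN w) (hstep w hw)
      intro x hx
      rw [List.contains_append, List.contains_append, hst x hx]

-- main pointwise agreement, by strong induction
theorem pvMain (m : Nat) : m ≤ 2147483648 →
    ∃ a t, pvALoopN (164 + m) [] m = some a ∧ pvBLoopN (164 + m) m = some t ∧ a = (t == 1) := by
  induction m using Nat.strong_induction_on with
  | _ m ih =>
  intro hm
  by_cases hsmall : m ≤ 163
  · have htbl := pvTable
    rw [Bool.and_eq_true] at htbl
    have h1 := htbl.1
    rw [List.all_eq_true] at h1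
    have hmt := h1 m (List.mem_range.2 (by omega))
    cases ha : pvALoopN 164 [] m with
    | none => rw [ha] at hmt; simp at hmt
    | some a =>
      cases hb : pvBLoopN 164 m with
      | none => rw [ha, hb] at hmt; simp at hmt
      | some t =>
        rw [ha, hb] at hmt
        simp only [beq_iff_eq] at hmt
        exact ⟨a, t, pvALoopN_mono 164 (164 + m) (by omega) _ _ _ ha,
               pvBLoopN_mono 164 (164 + m) (by omega) _ _ hb, hmt⟩
  · have h164 : 164 ≤ m := by omega
    have hw810 : pvStepN m ≤ 810 := by
      have := pvStepN_le m 10 (by omega) (by norm_num)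
      omega
    have hw243 : m ≤ 999 → pvStepN m ≤ 243 := by
      intro h
      have := pvStepN_le m 3 (by omega) (by norm_num)
      omega
    have hwlt : pvStepN m < m := by
      by_cases h999 : m ≤ 999
      · by_cases h243 : m ≤ 243
        · have := pvStepN_le_163 m h243; omega
        · have := hw243 h999; omega
      · omega
    have hA : pvALoopN (164 + m) [] m = pvALoopN (163 + m) [m] (pvStepN m) := by
      have he : 164 + m = (163 + m) + 1 := by omega
      rw [he, pvALoopN_succ]
      rw [if_neg (by simp; omega)]
      simp
    have hB : pvBLoopN (164 + m) m = pvBLoopN (163 + m) (pvStepN m) := by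
      have he : 164 + m = (163 + m) + 1 := by omega
      rw [he, pvBLoopN_succ]
      rw [if_neg (by simp; omega)]
    have hdrop : pvALoopN (163 + m) [m] (pvStepN m) = pvALoopN (163 + m) [] (pvStepN m) := by
      by_cases h999 : m ≤ 999
      · apply pvALoopN_set_congr (fun x => x ≤ 243 ∧ x < m)
          (fun w hw => ⟨by have := pvStepN_le_163 w hw.1; omega,
                        by have := pvStepN_le_163 w hw.1; omega⟩)
          (163 + m) [] [m]
          (fun x hx => by simp; omega)
          (pvStepN m) ⟨hw243 h999, hwlt⟩
      · apply pvALoopN_set_congr (fun x => x ≤ 810 ∧ x < m)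
          (fun w hw => ⟨by have := pvStepN_le w 3 (by omega) (by norm_num); omega,
                        by have := pvStepN_le w 3 (by omega) (by norm_num); omega⟩)
          (163 + m) [] [m]
          (fun x hx => by simp; omega)
          (pvStepN m) ⟨hw810, hwlt⟩
    obtain ⟨a, t, har, hbr, hat⟩ := ih (pvStepN m) hwlt (by omega)
    refine ⟨a, t, ?_, ?_, hat⟩
    · rw [hA, hdrop]
      exact pvALoopN_mono (164 + pvStepN m) (163 + m) (by omega) _ _ _ har
    · rw [hB]
      exact pvBLoopN_mono (164 + pvStepN m) (163 + m) (by omega) _ _ hbr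

theorem pvCheck_agree (v : Int) (h0 : 0 ≤ v) (h1 : v ≤ 2147483648) :
    pvCheckHappyA v = pvIsHappyB v := by
  obtain ⟨m, rfl⟩ : ∃ m : Nat, v = (m : Int) := ⟨v.toNat, (Int.toNat_of_nonneg h0).symm⟩
  have hm : m ≤ 2147483648 := by exact_mod_cast h1
  unfold pvCheckHappyA pvIsHappyB
  rw [Int.toNat_natCast]
  have hempty : (PySem.Set.empty : PySem.Set Int) = ([] : List Nat).map (fun x : Nat => (x : Int)) := rfl
  rw [hempty, pvALoop_cast, pvBLoop_cast]
  obtain ⟨a, t, ha, hb, hat⟩ := pvMain m hm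
  rw [ha, hb]
  simp only [Option.map_some, Option.getD_some]
  rw [hat]
  simp

-- ===== VERDICT (by name: the statement is the Claim_ definition above) =====
theorem n_happy_numbers_spec : Claim_equal_n_happy_numbers := by
  intro l hdom hpre
  unfold Spec_n_happy_numbers n_happy_numbers n_happy_numbers_alt
  show l.foldl (fun st el => if pvCheckHappyA el then (st.1 + 1, st.2 ++ [el]) else st)
        ((0 : Int), ([] : List Int))
      = (((l.filter (fun el => pvIsHappyB el)).length : Int),
          l.filter (fun el => pvIsHappyB el))
  have hel : ∀ el ∈ l, pvCheckHappyA el = pvIsHappyB el := by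
    intro el hmem
    have hd : pvDomInt el = true := by
      rw [Dom_n_happy_numbers, List.all_eq_true] at hdom
      exact hdom el hmem
    have hb : -2147483648 ≤ el ∧ el ≤ 2147483648 := by
      simpa [pvDomInt] using hd
    exact pvCheck_agree el (hpre el hmem) hb.2
  have hcongr : l.foldl (fun st el => if pvCheckHappyA el then (st.1 + 1, st.2 ++ [el]) else st)
        ((0 : Int), ([] : List Int))
      = l.foldl (fun st el => if pvIsHappyB el then (st.1 + 1, st.2 ++ [el]) else st)
        ((0 : Int), ([] : List Int)) :=
    PySem.List.foldl_congr_mem l _ _ _ (fun acc x hx => by rw [hel x hx])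
  rw [hcongr]
  have hsplit : (fun (st : Int × List Int) el =>
        if pvIsHappyB el then (st.1 + 1, st.2 ++ [el]) else st)
      = fun st el => (if pvIsHappyB el then st.1 + 1 else st.1,
                      if pvIsHappyB el then st.2 ++ [el] else st.2) := by
    funext st el
    by_cases h : pvIsHappyB el = true <;> simp [h]
  rw [hsplit]
  rw [PySem.List.foldl_prod_mk (f := fun a el => if pvIsHappyB el then a + 1 else a)
        (g := fun acc el => if pvIsHappyB el then acc ++ [el] else acc)]
  rw [PySem.List.foldl_if_add_one, PySem.List.foldl_append_if_eq_filter]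
  simp [List.countP_eq_length_filter]
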